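-- pv_equiv track=rewrite | github.com/przemekjoniec/matura | Matury/Maj 2024 2/Zadanie 3.3.py | f
-- ===== SOURCE A (Python) =====
-- def f(n):
--     m = ''
--     while n > 0:
--         litera = n % 10
--         if litera % 2 != 0:
--             m += str(litera)
--         n //= 10
--     return m[::-1]
-- ===== SOURCE B (Python) =====
-- def f(n):
--     if n <= 0:
--         return ''
--     return ''.join(c for c in str(n) if c in '13579')
-- ===== Notes on version B (the rewrite author's own statement) =====
-- stated objective: idiomatic
-- what changed: Replaces arithmetic least-significant-first digit peeling (%10, //10) with a string reversal at the end by a direct left-to-right filter over str(n), needing no reversal.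
import Mathlib
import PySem

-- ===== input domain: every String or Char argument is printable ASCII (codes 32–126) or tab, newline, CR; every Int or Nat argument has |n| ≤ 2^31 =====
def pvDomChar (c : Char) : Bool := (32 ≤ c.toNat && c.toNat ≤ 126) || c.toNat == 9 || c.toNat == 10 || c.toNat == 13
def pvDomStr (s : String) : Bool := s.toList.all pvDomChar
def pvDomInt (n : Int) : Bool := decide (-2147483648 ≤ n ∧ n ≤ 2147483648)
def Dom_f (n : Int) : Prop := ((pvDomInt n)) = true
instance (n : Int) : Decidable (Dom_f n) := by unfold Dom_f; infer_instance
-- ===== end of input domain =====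

-- B replaces A's least-significant-first digit peeling (%10, //10) plus final reversal by a
-- direct left-to-right filter over str(n); idiomatic, same behaviour.

-- ===== PORT A =====
-- the while loop of A, carrying the accumulator string m
def fLoop (n : Int) (m : String) : String :=
  if n > 0 then
    let litera := PySem.Int.mod n 10
    fLoop (PySem.Int.floordiv n 10)
      (if PySem.Int.mod litera 2 ≠ 0 then m ++ PySem.Int.toStr litera else m)
  else m
termination_by n.toNat
decreasing_by
  rw [PySem.Int.floordiv_eq_ediv_of_pos (by omega)]
  omega

def f (n : Int) : String :=
  ((PySem.Str.slice? (fLoop n "") none none (-1)).getD "")   -- m[::-1]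

-- ===== PORT B =====
def f_alt (n : Int) : String :=
  if n ≤ 0 then ""
  else String.ofList ((PySem.Int.toStr n).toList.filter (fun c => ['1','3','5','7','9'].contains c))

-- ===== PRECONDITION & SPEC =====
def Spec_f (n : Int) (out : String) : Prop := out = f_alt n
instance (n : Int) (out : String) : Decidable (Spec_f n out) := by unfold Spec_f; infer_instance

-- ===== CLAIM (what is proved, stated in full; the proofs are below) =====
def Claim_equal_f : Prop := ∀ (n : Int), Dom_f n → Spec_f n (f n)

-- ===== LEMMAS AND PROOFS =====

-- decimal digit characters, most significant first (matches Nat.toDigits 10)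
def dc (n : Nat) : List Char :=
  if n < 10 then [Nat.digitChar n] else dc (n / 10) ++ [Nat.digitChar (n % 10)]

-- odd digit characters, least significant first (matches A's accumulation order)
def oddLSB (n : Nat) : List Char :=
  if n = 0 then []
  else (if n % 10 % 2 = 1 then [Nat.digitChar (n % 10)] else []) ++ oddLSB (n / 10)

theorem toDigitsCore_append (b : Nat) : ∀ (f n : Nat) (l : List Char),
    Nat.toDigitsCore b f n l = Nat.toDigitsCore b f n [] ++ l := by
  intro f
  induction f with
  | zero => intro n l; simp [Nat.toDigitsCore]
  | succ f ih =>
    intro n l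
    simp only [Nat.toDigitsCore]
    by_cases h : n / b = 0
    · simp [h]
    · simp only [h, if_false]
      rw [ih (n / b) (Nat.digitChar (n % b) :: l), ih (n / b) [Nat.digitChar (n % b)]]
      simp

theorem toDigitsCore_eq_dc : ∀ (n f : Nat), n < f → Nat.toDigitsCore 10 f n [] = dc n := by
  intro n
  induction n using Nat.strong_induction_on with
  | _ n ih =>
    intro f hf
    obtain ⟨f', rfl⟩ : ∃ f', f = f' + 1 := ⟨f - 1, by omega⟩
    simp only [Nat.toDigitsCore]
    by_cases h : n / 10 = 0
    · rw [dc]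
      have h10 : n < 10 := by omega
      simp [h, h10, Nat.mod_eq_of_lt h10]
    · rw [toDigitsCore_append, ih (n / 10) (by omega) f' (by omega)]
      conv_rhs => rw [dc]
      have : ¬ n < 10 := by omega
      simp [this]

theorem toDigits_eq_dc (n : Nat) : Nat.toDigits 10 n = dc n :=
  toDigitsCore_eq_dc n (n + 1) (by omega)

theorem digitChar_mem (d : Nat) (hd : d < 10) :
    (['1','3','5','7','9'].contains (Nat.digitChar d)) = decide (d % 2 = 1) := by
  interval_cases d <;> decide

theorem oddLSB_reverse (n : Nat) (hn : 0 < n) :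
    (oddLSB n).reverse = (dc n).filter (fun c => ['1','3','5','7','9'].contains c) := by
  induction n using Nat.strong_induction_on with
  | _ n ih =>
    rw [oddLSB, dc]
    by_cases h10 : n < 10
    · have h0 : n / 10 = 0 := by omega
      have hm : n % 10 = n := Nat.mod_eq_of_lt h10
      rw [if_neg (show ¬ n = 0 by omega), if_pos h10, h0, hm,
        show oddLSB 0 = [] from by rw [oddLSB]; simp,
        List.append_nil, List.filter, digitChar_mem n h10]
      by_cases hp : n % 2 = 1 <;> simp [hp]
    · have hpos : 0 < n / 10 := by omega
      rw [if_neg (show ¬ n = 0 by omega), if_neg h10, List.reverse_append,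
        ih (n / 10) (by omega) hpos, List.filter_append]
      congr 1
      rw [List.filter, digitChar_mem (n % 10) (by omega)]
      have h2 : n % 10 % 2 = n % 2 := Nat.mod_mod_of_dvd n (by norm_num)
      rw [h2]
      by_cases hp : n % 2 = 1 <;> simp [hp]

theorem toChars_pos (n : Int) (hn : 0 < n) : PySem.Int.toChars n = dc n.toNat := by
  rw [PySem.Int.toChars, if_neg (show ¬ n < 0 by omega), toDigits_eq_dc]

theorem toStr_digit (d : Int) (h0 : 0 ≤ d) (h9 : d < 10) :
    (PySem.Int.toStr d).toList = [Nat.digitChar d.toNat] := by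
  rw [PySem.Int.toList_toStr, PySem.Int.toChars, if_neg (show ¬ d < 0 by omega),
    toDigits_eq_dc, dc, if_pos (show d.toNat < 10 by omega)]

theorem fLoop_invariant (k : Nat) : ∀ (n : Int), n.toNat ≤ k → ∀ (m : String),
    (fLoop n m).toList = m.toList ++ oddLSB n.toNat := by
  induction k with
  | zero =>
    intro n hk m
    rw [fLoop, if_neg (by omega)]
    have h0 : n.toNat = 0 := by omega
    rw [h0, oddLSB, if_pos rfl, List.append_nil]
  | succ k ih =>
    intro n hk m
    by_cases hn : n > 0
    · rw [fLoop, if_pos hn]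
      have hd : PySem.Int.floordiv n 10 = n / 10 := PySem.Int.floordiv_eq_ediv_of_pos (by omega)
      have hm : PySem.Int.mod n 10 = n % 10 := PySem.Int.mod_eq_emod_of_pos (by omega)
      have hlit0 : (0:Int) ≤ n % 10 := Int.emod_nonneg n (by omega)
      have hlit9 : n % 10 < 10 := Int.emod_lt_of_pos n (by omega)
      have hm2 : PySem.Int.mod (n % 10) 2 = (n % 10) % 2 :=
        PySem.Int.mod_eq_emod_of_pos (by omega)
      show (fLoop (PySem.Int.floordiv n 10)
          (if PySem.Int.mod (PySem.Int.mod n 10) 2 ≠ 0 then m ++ PySem.Int.toStr (PySem.Int.mod n 10) else m)).toList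
        = m.toList ++ oddLSB n.toNat
      rw [ih (PySem.Int.floordiv n 10) (by rw [hd]; omega)]
      have hnz : ¬ n.toNat = 0 := by omega
      have hq : (PySem.Int.floordiv n 10).toNat = n.toNat / 10 := by rw [hd]; omega
      have hr : n.toNat % 10 = (n % 10).toNat := by omega
      conv_rhs => rw [oddLSB, if_neg hnz]
      simp only [hm, hm2, hq]
      by_cases hp : (n % 10) % 2 = 1
      · rw [if_pos (show (n % 10) % 2 ≠ 0 by omega),
          if_pos (show n.toNat % 10 % 2 = 1 by omega),
          String.toList_append, toStr_digit (n % 10) hlit0 hlit9, hr, List.append_assoc]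
      · rw [if_neg (show ¬ (n % 10) % 2 ≠ 0 by omega),
          if_neg (show ¬ n.toNat % 10 % 2 = 1 by omega)]
        simp
    · rw [fLoop, if_neg hn]
      have h0 : n.toNat = 0 := by omega
      rw [h0, oddLSB, if_pos rfl, List.append_nil]

theorem f_eq_f_alt (n : Int) : f n = f_alt n := by
  rw [f, PySem.Str.slice?_none_none_neg_one, Option.getD_some,
    fLoop_invariant n.toNat n le_rfl ""]
  by_cases hn : n ≤ 0
  · have h0 : n.toNat = 0 := by omega
    rw [f_alt, if_pos hn, h0, oddLSB, if_pos rfl]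
    rfl
  · have hpos : 0 < n := by omega
    rw [f_alt, if_neg hn, PySem.Int.toList_toStr, toChars_pos n hpos]
    rw [show ("" : String).toList = ([] : List Char) from rfl, List.nil_append,
      oddLSB_reverse n.toNat (by omega)]

-- ===== VERDICT (by name: the statement is the Claim_ definition above) =====
theorem f_spec : Claim_equal_f := by
  intro n _
  unfold Spec_f
  exact f_eq_f_alt n
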